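-- pv_equiv track=rewrite | github.com/Wierni-Fanowie-wasatego-dziekana/Zadanka | Zadanie_4_Kolokwium_2_2021.py | fib_in_array
-- ===== SOURCE A (Python) =====
-- def fib(n1,n2,n3):
--     # f0=0
--     # f1=1
--     # for i in range(n):
--     #     f1,f0=f0+f1,f1
--     a, b = 1,1
--     if n1 + n2 == n3:
--         while b < n3:
--             a, b = b, a + b
--         return n3 == b and n2 == a
--     return False
--
-- def fib_in_array(T):
--     n = len(T)
--     dl = 2
--     for i in range(0,n): # check rows ascending
--         for j in range(2,n):
--             if fib(T[i][j-2],T[i][j-1],T[i][j]):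
--                 dl +=1
--             elif dl >= 3:
--                 return dl
--         if dl >=3:
--             return dl
--
--     for i in range(0,n): # check rows descending
--         for j in range(2,n):
--             if fib(T[i][j],T[i][j-1],T[i][j-2]):
--                 dl+=1
--             elif dl >=3:
--                 return dl
--         if dl >=3:
--             return dl
--
--     for j in range(n): # check cols ascending
--         for i in range(2, n):
--             if fib(T[i-2][j], T[i-1][j], T[i][j]):
--                 dl += 1
--             elif dl >= 3:
--                 return dl
--         if dl >= 3:
--             return dl
--
--     for j in range(n): # check cols descending
--         for i in range(2, n):
--             if fib(T[i][j], T[i - 1][j], T[i-2][j]):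
--                 dl += 1
--             elif dl >= 3:
--                 return dl
--         if dl >= 3:
--             return dl
--
--     return 1
-- ===== SOURCE B (Python) =====
-- def is_fib(a, b, c):
--     # c must be the sum of a and b, and (b, c) a consecutive pair of the
--     # Fibonacci climb 1, 1, 2, 3, 5, ... stopped at the first value >= c.
--     if a + b != c:
--         return False
--     x, y = 1, 1
--     while y < c:
--         x, y = y, x + y
--     return (b, c) == (x, y)
--
--
-- def fib_in_array(T):
--     n = len(T)
--     rows = [T[i] for i in range(n)]
--     cols = [[T[i][j] for i in range(n)] for j in range(n)]
--     # the scan lines in A's phase order; True = the triple is read reversed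
--     scan = ([(L, False) for L in rows] + [(L, True) for L in rows]
--             + [(L, False) for L in cols] + [(L, True) for L in cols])
--     for L, rev in scan:
--         hs = []
--         for j in range(2, n):
--             a, b, c = L[j - 2], L[j - 1], L[j]
--             hs.append(is_fib(c, b, a) if rev else is_fib(a, b, c))
--         if True in hs:
--             k = hs.index(True)
--             run = 1
--             while k + run < len(hs) and hs[k + run]:
--                 run += 1
--             return 2 + run
--     return 1
-- ===== Notes on version B (the rewrite author's own statement) =====
-- stated objective: alternative
-- what changed: A's four copy-pasted double loops with a global non-resetting counter and three early-return sites are replaced by one uniform pass over a precomputed table of directed scan lines (rows, reversed rows, columns, reversed columns), where the answer for the first line containing a Fibonacci triple is computed directly as 2 plus the consecutive run of hits starting at its first hit.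
-- outside the precondition, e.g. on fib_in_array([[1, 1, 2], [2, 3, 5], [1, 1]]): A returns 3, B raises IndexError; on fib_in_array([[1], []]): A returns 1, B raises IndexError
import Mathlib
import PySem

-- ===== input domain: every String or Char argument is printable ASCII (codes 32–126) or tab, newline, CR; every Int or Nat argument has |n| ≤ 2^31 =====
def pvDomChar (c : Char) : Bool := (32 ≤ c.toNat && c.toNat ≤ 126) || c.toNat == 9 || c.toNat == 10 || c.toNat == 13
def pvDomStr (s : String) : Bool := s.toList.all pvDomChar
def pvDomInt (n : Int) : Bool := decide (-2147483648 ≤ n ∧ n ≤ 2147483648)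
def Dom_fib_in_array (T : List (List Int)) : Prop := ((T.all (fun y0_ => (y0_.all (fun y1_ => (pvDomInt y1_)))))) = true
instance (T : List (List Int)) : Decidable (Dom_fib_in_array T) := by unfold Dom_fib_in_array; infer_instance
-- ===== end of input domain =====

-- B replaces A's four copy-pasted early-returning double loops by one uniform pass over a
-- precomputed table of directed scan lines (alternative decomposition, same cost).


-- ===== PORT A =====
-- while b < n3: a, b = b, a + b   (the extra '1 ≤ a' guard only makes the recursion
-- well-founded; in every call a starts at 1 and stays ≥ 1, so it never alters the computation)
def fibLoop (n3 a b : Int) : Int × Int :=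
  if _h : b < n3 ∧ 1 ≤ a then fibLoop n3 b (a + b) else (a, b)
  termination_by (n3 - b).toNat
  decreasing_by omega

def fibCheck (n1 n2 n3 : Int) : Bool :=
  if n1 + n2 == n3 then
    let p := fibLoop n3 1 1
    n3 == p.2 && n2 == p.1
  else false

-- T[i][j]; outside Pre_ (where Python raises IndexError) the port defaults to 0
def tget (T : List (List Int)) (i j : Int) : Int :=
  ((PySem.List.pyGet? T i).bind (fun r => PySem.List.pyGet? r j)).getD 0

-- the inner 'for j in range(2, n)' with its elif-return; .error = early return
def innerFold (trip : Int → Bool) (dl : Int) : List Int → Except Int Int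
  | [] => .ok dl
  | j :: rest =>
    if trip j then innerFold trip (dl + 1) rest
    else if 3 ≤ dl then .error dl else innerFold trip dl rest

-- one of A's four outer loops (they differ only in the triple read at (outer, inner))
def outerFold (trip : Int → Int → Bool) (n dl : Int) : List Int → Except Int Int
  | [] => .ok dl
  | i :: rest =>
    match innerFold (trip i) dl (PySem.List.pyRange 2 n 1) with
    | .error r => .error r
    | .ok dl' => if 3 ≤ dl' then .error dl' else outerFold trip n dl' rest

def fib_in_array (T : List (List Int)) : Int :=
  let n : Int := T.length
  match outerFold (fun i j => fibCheck (tget T i (j-2)) (tget T i (j-1)) (tget T i j)) n 2 (PySem.List.pyRange 0 n 1) with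
  | .error r => r
  | .ok dl1 =>
  match outerFold (fun i j => fibCheck (tget T i j) (tget T i (j-1)) (tget T i (j-2))) n dl1 (PySem.List.pyRange 0 n 1) with
  | .error r => r
  | .ok dl2 =>
  match outerFold (fun j i => fibCheck (tget T (i-2) j) (tget T (i-1) j) (tget T i j)) n dl2 (PySem.List.pyRange 0 n 1) with
  | .error r => r
  | .ok dl3 =>
  match outerFold (fun j i => fibCheck (tget T i j) (tget T (i-1) j) (tget T (i-2) j)) n dl3 (PySem.List.pyRange 0 n 1) with
  | .error r => r
  | .ok _ => 1

-- ===== PORT B =====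
def isFibLoop (c x y : Int) : Int × Int :=
  if _h : y < c ∧ 1 ≤ x then isFibLoop c y (x + y) else (x, y)
  termination_by (c - y).toNat
  decreasing_by omega

def isFib (a b c : Int) : Bool :=
  if a + b ≠ c then false
  else
    let p := isFibLoop c 1 1
    b == p.1 && c == p.2

-- L[j]; outside Pre_ the port defaults to 0
def lget (L : List Int) (j : Int) : Int := (PySem.List.pyGet? L j).getD 0

-- hs = [is_fib on the (possibly reversed) consecutive triple at j, j in range(2, n)]
def hitsOf (n : Int) (L : List Int) (rev : Bool) : List Bool :=
  (PySem.List.pyRange 2 n 1).map (fun j =>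
    if rev then isFib (lget L j) (lget L (j-1)) (lget L (j-2))
    else isFib (lget L (j-2)) (lget L (j-1)) (lget L j))

-- while k + run < len(hs) and hs[k + run]: run += 1
def runLoop (hs : List Bool) (k run : Int) : Int :=
  if _h : k + run < (hs.length : Int) ∧ (PySem.List.pyGet? hs (k + run)).getD false = true
  then runLoop hs k (run + 1) else run
  termination_by ((hs.length : Int) - (k + run)).toNat
  decreasing_by omega

def scanLoop (n : Int) : List (List Int × Bool) → Int
  | [] => 1
  | (L, rev) :: rest =>
    let hs := hitsOf n L rev
    if hs.contains true then
      2 + runLoop hs (((PySem.List.index? hs true).getD 0 : Nat) : Int) 1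
    else scanLoop n rest

def fib_in_array_alt (T : List (List Int)) : Int :=
  let n : Int := T.length
  let idxs := PySem.List.pyRange 0 n 1
  let rows := idxs.map (fun i => (PySem.List.pyGet? T i).getD [])
  let cols := idxs.map (fun j => idxs.map (fun i => lget ((PySem.List.pyGet? T i).getD []) j))
  let scan := rows.map (fun L => (L, false)) ++ rows.map (fun L => (L, true))
           ++ cols.map (fun L => (L, false)) ++ cols.map (fun L => (L, true))
  scanLoop n scan

-- ===== PRECONDITION & SPEC =====
-- Pre_ excludes ragged arrays (some row shorter than len(T)): Python A raises IndexError on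
-- most of them and returns a value only on the rest (len(T) < 3, or an early return hit
-- first), while B, which builds every column up front, raises IndexError on all of them.
def Pre_fib_in_array (T : List (List Int)) : Prop :=
  ∀ row ∈ T, T.length ≤ row.length
instance (T : List (List Int)) : Decidable (Pre_fib_in_array T) := by
  unfold Pre_fib_in_array; infer_instance

def pvWitness_fib_in_array : List (List Int) := [[1, 1, 2], [2, 3, 5], [7, 8, 9]]

def Spec_fib_in_array (T : List (List Int)) (out : Int) : Prop := out = fib_in_array_alt T
instance (T : List (List Int)) (out : Int) : Decidable (Spec_fib_in_array T out) := by
  unfold Spec_fib_in_array; infer_instance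

-- ===== CLAIM (what is proved, stated in full; the proofs are below) =====
def Claim_equal_fib_in_array : Prop :=
  ∀ (T : List (List Int)), Dom_fib_in_array T → Pre_fib_in_array T →
    Spec_fib_in_array T (fib_in_array T)

-- ===== LEMMAS AND PROOFS =====

-- the two climbing loops are the same function, and the two triple tests agree
theorem isFibLoop_eq_fibLoop (c x y : Int) : isFibLoop c x y = fibLoop c x y := by
  fun_induction isFibLoop c x y
  all_goals rw [fibLoop]; simp_all

theorem isFib_eq_fibCheck (a b c : Int) : isFib a b c = fibCheck a b c := by
  unfold isFib fibCheck
  rw [isFibLoop_eq_fibLoop]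
  by_cases h : a + b = c
  · simp [h, Bool.and_comm]
  · simp [h]

-- A's inner loop seen on the list of hit booleans alone
def innerB (dl : Int) : List Bool → Except Int Int
  | [] => .ok dl
  | b :: r =>
    if b then innerB (dl + 1) r
    else if 3 ≤ dl then .error dl else innerB dl r

-- one line followed by the end-of-line 'if dl >= 3: return dl'
def stepLine (dl : Int) (hs : List Bool) : Except Int Int :=
  match innerB dl hs with
  | .error r => .error r
  | .ok d => if 3 ≤ d then .error d else .ok d

def chainLines (dl : Int) : List (List Bool) → Except Int Int
  | [] => .ok dl
  | hs :: rest =>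
    match stepLine dl hs with
    | .error r => .error r
    | .ok d => chainLines d rest

theorem innerFold_eq_innerB (trip : Int → Bool) (dl : Int) (js : List Int) :
    innerFold trip dl js = innerB dl (js.map trip) := by
  induction js generalizing dl with
  | nil => rfl
  | cons j r ih => simp only [innerFold, List.map, innerB]; split_ifs <;> simp [ih]

theorem outerFold_eq_chainLines (trip : Int → Int → Bool) (n dl : Int) (is : List Int) :
    outerFold trip n dl is =
      chainLines dl (is.map (fun i => (PySem.List.pyRange 2 n 1).map (trip i))) := by
  induction is generalizing dl with
  | nil => rfl
  | cons i r ih =>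
    simp only [outerFold, List.map, chainLines, stepLine, innerFold_eq_innerB]
    cases innerB dl ((PySem.List.pyRange 2 n 1).map (trip i)) with
    | error e => rfl
    | ok d => by_cases h : 3 ≤ d <;> simp [h, ih]

theorem chainLines_append (dl : Int) (X Y : List (List Bool)) :
    chainLines dl (X ++ Y) =
      match chainLines dl X with
      | .error r => .error r
      | .ok d => chainLines d Y := by
  induction X generalizing dl with
  | nil => rfl
  | cons hs r ih =>
    simp only [List.cons_append, chainLines]
    cases stepLine dl hs with
    | error e => rfl
    | ok d => exact ih d

-- number of leading hits / length of the hit run starting at the first hit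
def takeRun : List Bool → Int
  | [] => 0
  | true :: r => 1 + takeRun r
  | false :: _ => 0

def firstRun : List Bool → Int
  | [] => 0
  | true :: r => 1 + takeRun r
  | false :: r => firstRun r

theorem stepLine_cons_true (dl : Int) (r : List Bool) :
    stepLine dl (true :: r) = stepLine (dl + 1) r := by
  simp [stepLine, innerB]

theorem stepLine_high (hs : List Bool) (dl : Int) (h : 3 ≤ dl) :
    stepLine dl hs = .error (dl + takeRun hs) := by
  induction hs generalizing dl with
  | nil => simp [stepLine, innerB, takeRun, h]
  | cons b r ih =>
    cases b with
    | true =>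
      rw [stepLine_cons_true, ih (dl + 1) (by omega)]
      simp only [takeRun]; congr 1; ring
    | false => simp [stepLine, innerB, takeRun, h]

theorem stepLine_two (hs : List Bool) :
    stepLine 2 hs = if hs.contains true then .error (2 + firstRun hs) else .ok 2 := by
  induction hs with
  | nil => simp [stepLine, innerB]
  | cons b r ih =>
    cases b with
    | true =>
      rw [stepLine_cons_true]
      have h21 : (2 : Int) + 1 = 3 := by norm_num
      rw [h21, stepLine_high r 3 (by omega)]
      simp only [List.contains_cons, Bool.true_beq, Bool.true_or, if_true, firstRun]
      congr 1; ring
    | false =>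
      have e : stepLine 2 (false :: r) = stepLine 2 r := by
        simp [stepLine, innerB]
      rw [e, ih]
      simp [firstRun]

-- B's per-line answer, abstractly
def bProcess : List (List Bool) → Int
  | [] => 1
  | hs :: rest => if hs.contains true then 2 + firstRun hs else bProcess rest

theorem chainLines_two_eq_bProcess (HS : List (List Bool)) :
    (match chainLines 2 HS with | .error r => r | .ok _ => 1) = bProcess HS := by
  induction HS with
  | nil => rfl
  | cons hs rest ih =>
    simp only [chainLines, bProcess, stepLine_two hs]
    by_cases h : hs.contains true
    · rw [if_pos h, if_pos h]
    · rw [if_neg h, if_neg h]; exact ih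

theorem runLoop_drop (hs : List Bool) (k run : Int) :
    0 ≤ k + run → runLoop hs k run = run + takeRun (hs.drop (k + run).toNat) := by
  fun_induction runLoop hs k run with
  | case1 run h ih =>
    intro hk
    obtain ⟨hlt, hget⟩ := h
    rw [ih (by omega)]
    rw [PySem.List.pyGet?_of_nonneg hs hk] at hget
    have hn : (k + run).toNat < hs.length := by omega
    rw [List.getElem?_eq_getElem hn] at hget
    simp only [Option.getD_some] at hget
    have hd : hs.drop (k + run).toNat = true :: hs.drop ((k + run).toNat + 1) := by
      rw [List.drop_eq_getElem_cons hn, hget]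
    have ht : ((k + run).toNat + 1) = (k + (run + 1)).toNat := by omega
    rw [hd, takeRun, ht]
    ring
  | case2 run h =>
    intro hk
    by_cases hlt : k + run < (hs.length : Int)
    · have hget : (PySem.List.pyGet? hs (k + run)).getD false = false := by
        rcases h' : (PySem.List.pyGet? hs (k + run)).getD false with _ | _
        · rfl
        · exact absurd ⟨hlt, h'⟩ h
      rw [PySem.List.pyGet?_of_nonneg hs hk] at hget
      have hn : (k + run).toNat < hs.length := by omega
      rw [List.getElem?_eq_getElem hn] at hget
      simp only [Option.getD_some] at hget
      rw [List.drop_eq_getElem_cons hn, hget, takeRun]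
      ring
    · rw [List.drop_eq_nil_of_le (by omega), takeRun]; ring

theorem firstRun_prefix (pre suf : List Bool) (hp : true ∉ pre) :
    firstRun (pre ++ true :: suf) = 1 + takeRun suf := by
  induction pre with
  | nil => simp [firstRun]
  | cons b r ih =>
    cases b with
    | true => exact absurd (by simp) hp
    | false =>
      have hp' : true ∉ r := fun hr => hp (List.mem_cons_of_mem _ hr)
      simpa [firstRun] using ih hp'

theorem runLoop_firstRun (hs : List Bool) (h : hs.contains true) :
    2 + runLoop hs (((PySem.List.index? hs true).getD 0 : Nat) : Int) 1 = 2 + firstRun hs := by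
  have hm : true ∈ hs := by simpa using h
  have hsome : (PySem.List.index? hs true).isSome := (PySem.List.index?_isSome_iff hs true).2 hm
  obtain ⟨k, hk⟩ := Option.isSome_iff_exists.1 hsome
  obtain ⟨pre, suf, hsplit, hlen, hpre⟩ := (PySem.List.index?_eq_some_iff hs true k).1 hk
  rw [hk]
  simp only [Option.getD_some]
  rw [runLoop_drop hs k 1 (by omega)]
  have ht : (((k : Int)) + 1).toNat = k + 1 := by omega
  rw [ht, hsplit]
  have hd : List.drop (k + 1) (pre ++ true :: suf) = suf := by
    have e1 : List.drop k (pre ++ true :: suf) = true :: suf := List.drop_left' hlen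
    calc List.drop (k + 1) (pre ++ true :: suf)
        = List.drop 1 (List.drop k (pre ++ true :: suf)) := by rw [List.drop_drop]
      _ = suf := by rw [e1]; rfl
  rw [hd, firstRun_prefix pre suf hpre]

theorem scanLoop_eq_bProcess (n : Int) (ls : List (List Int × Bool)) :
    scanLoop n ls = bProcess (ls.map (fun p => hitsOf n p.1 p.2)) := by
  induction ls with
  | nil => rfl
  | cons p rest ih =>
    obtain ⟨L, rev⟩ := p
    simp only [List.map, scanLoop, bProcess]
    by_cases h : (hitsOf n L rev).contains true
    · rw [if_pos h, if_pos h]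
      exact runLoop_firstRun _ h
    · rw [if_neg h, if_neg h]; exact ih

theorem lget_tget (T : List (List Int)) (i x : Int) :
    lget ((PySem.List.pyGet? T i).getD []) x = tget T i x := by
  unfold lget tget
  cases PySem.List.pyGet? T i <;> simp [PySem.List.pyGet?]

theorem lget_eq_pyGetD (L : List Int) (j : Int) : lget L j = PySem.List.pyGetD L j 0 := by
  simp [lget, PySem.List.pyGetD]

theorem col_hits (T : List (List Int)) (o : Int) (rev : Bool) :
    hitsOf (T.length : Int) ((PySem.List.pyRange 0 (T.length : Int) 1).map (fun i => tget T i o)) rev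
      = (PySem.List.pyRange 2 (T.length : Int) 1).map (fun i =>
          if rev then fibCheck (tget T i o) (tget T (i-1) o) (tget T (i-2) o)
          else fibCheck (tget T (i-2) o) (tget T (i-1) o) (tget T i o)) := by
  unfold hitsOf
  apply List.map_congr_left
  intro i hi
  rw [PySem.List.mem_pyRange_one] at hi
  have g0 : lget ((PySem.List.pyRange 0 (T.length : Int) 1).map (fun i => tget T i o)) i = tget T i o := by
    rw [lget_eq_pyGetD, PySem.List.pyGetD_map_pyRange_of_nonneg _ _ _ _ (by omega) (by omega)]
  have g1 : lget ((PySem.List.pyRange 0 (T.length : Int) 1).map (fun i => tget T i o)) (i - 1) = tget T (i - 1) o := by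
    rw [lget_eq_pyGetD, PySem.List.pyGetD_map_pyRange_of_nonneg _ _ _ _ (by omega) (by omega)]
  have g2 : lget ((PySem.List.pyRange 0 (T.length : Int) 1).map (fun i => tget T i o)) (i - 2) = tget T (i - 2) o := by
    rw [lget_eq_pyGetD, PySem.List.pyGetD_map_pyRange_of_nonneg _ _ _ _ (by omega) (by omega)]
  cases rev <;> simp [g0, g1, g2, isFib_eq_fibCheck]

theorem fourPhase (f1 f2 f3 f4 : Int → Int → Bool) (n : Int) (is : List Int) :
    (match outerFold f1 n 2 is with
     | .error r => r
     | .ok d1 =>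
     match outerFold f2 n d1 is with
     | .error r => r
     | .ok d2 =>
     match outerFold f3 n d2 is with
     | .error r => r
     | .ok d3 =>
     match outerFold f4 n d3 is with
     | .error r => r
     | .ok _ => 1) =
    bProcess (is.map (fun i => (PySem.List.pyRange 2 n 1).map (f1 i))
      ++ is.map (fun i => (PySem.List.pyRange 2 n 1).map (f2 i))
      ++ is.map (fun i => (PySem.List.pyRange 2 n 1).map (f3 i))
      ++ is.map (fun i => (PySem.List.pyRange 2 n 1).map (f4 i))) := by
  rw [← chainLines_two_eq_bProcess]
  simp only [outerFold_eq_chainLines, chainLines_append]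
  cases chainLines 2 (is.map (fun i => (PySem.List.pyRange 2 n 1).map (f1 i))) with
  | error r => rfl
  | ok d1 =>
    dsimp only
    cases chainLines d1 (is.map (fun i => (PySem.List.pyRange 2 n 1).map (f2 i))) with
    | error r => rfl
    | ok d2 =>
      dsimp only
      cases chainLines d2 (is.map (fun i => (PySem.List.pyRange 2 n 1).map (f3 i))) with
      | error r => rfl
      | ok d3 => dsimp only

theorem alt_eq (T : List (List Int)) :
    fib_in_array_alt T =
      bProcess ((PySem.List.pyRange 0 (T.length : Int) 1).map (fun i => (PySem.List.pyRange 2 (T.length : Int) 1).map (fun j => fibCheck (tget T i (j-2)) (tget T i (j-1)) (tget T i j)))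
        ++ (PySem.List.pyRange 0 (T.length : Int) 1).map (fun i => (PySem.List.pyRange 2 (T.length : Int) 1).map (fun j => fibCheck (tget T i j) (tget T i (j-1)) (tget T i (j-2))))
        ++ (PySem.List.pyRange 0 (T.length : Int) 1).map (fun o => (PySem.List.pyRange 2 (T.length : Int) 1).map (fun i => fibCheck (tget T (i-2) o) (tget T (i-1) o) (tget T i o)))
        ++ (PySem.List.pyRange 0 (T.length : Int) 1).map (fun o => (PySem.List.pyRange 2 (T.length : Int) 1).map (fun i => fibCheck (tget T i o) (tget T (i-1) o) (tget T (i-2) o)))) := by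
  simp only [fib_in_array_alt]
  rw [scanLoop_eq_bProcess]
  congr 1
  simp only [List.map_append, List.map_map]
  congr 1
  · congr 1
    · congr 1
      · apply List.map_congr_left
        intro i _
        simp [hitsOf, isFib_eq_fibCheck, lget_tget]
      · apply List.map_congr_left
        intro i _
        simp [hitsOf, isFib_eq_fibCheck, lget_tget]
    · apply List.map_congr_left
      intro o _
      have e : (fun i => lget ((PySem.List.pyGet? T i).getD []) o) = (fun i => tget T i o) := by
        funext i
        exact lget_tget T i o
      dsimp only [Function.comp_apply]
      rw [e]
      simpa using col_hits T o false
  · apply List.map_congr_left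
    intro o _
    have e : (fun i => lget ((PySem.List.pyGet? T i).getD []) o) = (fun i => tget T i o) := by
      funext i
      exact lget_tget T i o
    dsimp only [Function.comp_apply]
    rw [e]
    simpa using col_hits T o true

-- ===== VERDICT (by name: the statement is the Claim_ definition above) =====
theorem fib_in_array_spec : Claim_equal_fib_in_array := by
  intro T _ _
  unfold Spec_fib_in_array
  rw [alt_eq]
  simp only [fib_in_array]
  rw [fourPhase]
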